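-- pv_equiv track=rewrite | github.com/petukhovv/tree2vec | lib/FeatureExtraction/Features/AllNGramsNumberExtractor.py | ngrams_recurrent_build
-- ===== SOURCE A (Python) =====
-- from copy import copy, deepcopy
--
-- def ngrams_recurrent_build(n, params, ngrams_on_path, node_type):
--     """
--     Recurrent n-grams building: append of current node type to n-grams of previous nodes
--         (according to max distance).
--
--     :param n: n in n-gram (n-gram order)
--     :param ngrams_on_path: temporary n-gram list for nodes, which are on the current path
--     :param node_type: current node type
--
--     :return: appendant 'n-grams on path' list
--     """
--     grams_on_path = []
--     i = 0
--
--     for ngrams in reversed(ngrams_on_path):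
--         if params['max_distance'] is not None and i >= params['max_distance']:
--             continue
--         if len(ngrams) < n:
--             continue
--         for gram in ngrams[n - 1]:
--             gram_appendant = copy(gram)
--             gram_appendant.append(node_type)
--             grams_on_path.append(gram_appendant)
--         i += 1
--
--     return grams_on_path
-- ===== SOURCE B (Python) =====
-- from copy import copy
--
--
-- def ngrams_recurrent_build(n, params, ngrams_on_path, node_type):
--     # Forward single pass keeping a bounded sliding window of the most recent
--     # qualifying entries (evicting the oldest from the front), then emit from
--     # the reversed window.
--     md = params['max_distance']
--     limit = None if md is None else max(md, 0)
--     window = []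
--     for ngrams in ngrams_on_path:
--         if len(ngrams) >= n:
--             window.append(ngrams)
--             if limit is not None and len(window) > limit:
--                 window.pop(0)
--     out = []
--     for ngrams in reversed(window):
--         for gram in ngrams[n - 1]:
--             g = copy(gram)
--             g.append(node_type)
--             out.append(g)
--     return out
-- ===== Notes on version B (the rewrite author's own statement) =====
-- stated objective: alternative
-- what changed: Replaces A's reversed scan with a manual distance counter and continue guards by a forward single pass that maintains a bounded sliding window of the most recent qualifying entries (evicting the oldest from the front), then emits the appended grams from the reversed window.
-- outside the precondition, e.g. on ngrams_recurrent_build(1, {}, [], 'x'): A returns [], B raises KeyError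
import Mathlib
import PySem

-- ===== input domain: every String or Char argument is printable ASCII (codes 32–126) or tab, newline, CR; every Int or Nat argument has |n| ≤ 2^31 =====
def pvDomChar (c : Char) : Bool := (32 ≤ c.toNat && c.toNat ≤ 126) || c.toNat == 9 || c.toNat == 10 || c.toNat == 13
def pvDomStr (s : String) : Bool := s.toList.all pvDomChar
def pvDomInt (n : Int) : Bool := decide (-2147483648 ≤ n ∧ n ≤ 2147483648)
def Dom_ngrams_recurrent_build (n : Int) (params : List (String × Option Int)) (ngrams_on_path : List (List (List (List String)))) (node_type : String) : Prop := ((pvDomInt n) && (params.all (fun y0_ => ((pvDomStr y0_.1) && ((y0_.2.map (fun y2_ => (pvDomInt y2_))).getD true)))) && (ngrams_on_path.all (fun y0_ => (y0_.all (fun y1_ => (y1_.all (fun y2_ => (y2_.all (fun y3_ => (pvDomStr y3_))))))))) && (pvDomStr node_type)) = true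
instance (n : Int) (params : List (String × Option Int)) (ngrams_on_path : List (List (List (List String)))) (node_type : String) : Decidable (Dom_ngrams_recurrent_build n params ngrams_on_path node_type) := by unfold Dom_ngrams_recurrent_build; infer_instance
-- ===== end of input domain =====

-- B replaces A's reversed scan with a distance counter by a forward pass keeping a bounded
-- sliding window of the most recent qualifying entries (evict oldest), then emits from the
-- reversed window (objective: alternative decomposition, same cost).


-- ===== PORT A =====
-- params['max_distance'] : first-match association-list lookup; missing key (Python KeyError) is
-- excluded by Pre_, the port reads `none` (Python None) there.
def ngrams_recurrent_build (n : Int) (params : List (String × Option Int)) (ngrams_on_path : List (List (List (List String)))) (node_type : String) : List (List String) :=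
  let md : Option Int := ((PySem.Dict.mk params).get? "max_distance").getD none
  (ngrams_on_path.reverse.foldl
    (fun (st : List (List String) × Int) (ngrams : List (List (List String))) =>
      if md.isSome && decide (md.getD 0 ≤ st.2) then st
      else if decide ((ngrams.length : Int) < n) then st
      else (((PySem.List.pyGet? ngrams (n - 1)).getD []).foldl
              (fun g gram => g ++ [gram ++ [node_type]]) st.1, st.2 + 1))
    ([], 0)).1

-- ===== PORT B =====
-- window.pop(0) on a (necessarily nonempty) list is exact as List.drop 1.
def ngrams_recurrent_build_alt (n : Int) (params : List (String × Option Int)) (ngrams_on_path : List (List (List (List String)))) (node_type : String) : List (List String) :=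
  let md : Option Int := ((PySem.Dict.mk params).get? "max_distance").getD none
  let limit : Option Int := md.map (fun d => max d 0)
  let window := ngrams_on_path.foldl
    (fun (w : List (List (List (List String)))) ngrams =>
      if decide (n ≤ (ngrams.length : Int)) then
        match limit with
        | some l => if decide (l < ((w ++ [ngrams]).length : Int)) then (w ++ [ngrams]).drop 1 else w ++ [ngrams]
        | none => w ++ [ngrams]
      else w) []
  window.reverse.foldl
    (fun out ngrams =>
      ((PySem.List.pyGet? ngrams (n - 1)).getD []).foldl
        (fun o gram => o ++ [gram ++ [node_type]]) out) []

-- ===== PRECONDITION & SPEC =====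
-- Pre_ excludes (a) inputs without a 'max_distance' key, on which A raises KeyError whenever the
-- path loop runs but accidentally returns [] on an empty path (B's unconditional lookup raises),
-- and (b) inputs (only possible for n ≤ 0) where the wrapped index ngrams[n-1] is out of range in
-- some consulted entry, so both programs raise IndexError.
def Pre_ngrams_recurrent_build (n : Int) (params : List (String × Option Int)) (ngrams_on_path : List (List (List (List String)))) (node_type : String) : Prop :=
  (((PySem.Dict.mk params).get? "max_distance").isSome = true) ∧
  (∀ ngrams ∈ (match ((PySem.Dict.mk params).get? "max_distance").getD none with
      | none => ngrams_on_path.reverse.filter (fun ng : List (List (List String)) => decide (n ≤ (ng.length : Int)))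
      | some d => (ngrams_on_path.reverse.filter (fun ng : List (List (List String)) => decide (n ≤ (ng.length : Int)))).take (max d 0).toNat),
    1 - n ≤ (ngrams.length : Int))
instance (n : Int) (params : List (String × Option Int)) (ngrams_on_path : List (List (List (List String)))) (node_type : String) : Decidable (Pre_ngrams_recurrent_build n params ngrams_on_path node_type) := by unfold Pre_ngrams_recurrent_build; infer_instance

def pvWitness_ngrams_recurrent_build : Int × (List (String × Option Int)) × List (List (List (List String))) × String :=
  (2, [("max_distance", some 1)], [[[["a"]], [["b"], ["c"]]]], "T")

def Spec_ngrams_recurrent_build (n : Int) (params : List (String × Option Int)) (ngrams_on_path : List (List (List (List String)))) (node_type : String) (out : List (List String)) : Prop := out = ngrams_recurrent_build_alt n params ngrams_on_path node_type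
instance (n : Int) (params : List (String × Option Int)) (ngrams_on_path : List (List (List (List String)))) (node_type : String) (out : List (List String)) : Decidable (Spec_ngrams_recurrent_build n params ngrams_on_path node_type out) := by unfold Spec_ngrams_recurrent_build; infer_instance

-- ===== CLAIM (what is proved, stated in full; the proofs are below) =====
def Claim_equal_ngrams_recurrent_build : Prop := ∀ (n : Int) (params : List (String × Option Int)) (ngrams_on_path : List (List (List (List String)))) (node_type : String), Dom_ngrams_recurrent_build n params ngrams_on_path node_type → Pre_ngrams_recurrent_build n params ngrams_on_path node_type → Spec_ngrams_recurrent_build n params ngrams_on_path node_type (ngrams_recurrent_build n params ngrams_on_path node_type)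

-- ===== LEMMAS AND PROOFS =====

-- A's loop with max_distance = None: every qualifying entry is emitted.
theorem pv_loop_none (n : Int) (node_type : String)
    (L : List (List (List (List String)))) (acc : List (List String)) (i : Int) :
    (L.foldl
      (fun (st : List (List String) × Int) ngrams =>
        if decide ((ngrams.length : Int) < n) = true then st
        else (((PySem.List.pyGet? ngrams (n - 1)).getD []).foldl
                (fun g gram => g ++ [gram ++ [node_type]]) st.1, st.2 + 1))
      (acc, i)).1
    = acc ++ (L.filter (fun ng => decide (n ≤ (ng.length : Int)))).flatMap
        (fun ngrams => ((PySem.List.pyGet? ngrams (n - 1)).getD []).map (fun gram => gram ++ [node_type])) := by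
  induction L generalizing acc i with
  | nil => simp
  | cons x L ih =>
    simp only [List.foldl_cons]
    by_cases hq : n ≤ (x.length : Int)
    · rw [if_neg (by simp [not_lt.mpr hq])]
      rw [ih, PySem.List.foldl_append_singleton_eq_map]
      simp [hq]
    · rw [if_pos (decide_eq_true (lt_of_not_ge hq))]
      rw [ih]
      simp [not_le.mpr (lt_of_not_ge hq)]

-- A's loop with max_distance = d: exactly the first (d - i) qualifying entries are emitted.
theorem pv_loop_some (n : Int) (node_type : String) (d : Int)
    (L : List (List (List (List String)))) (acc : List (List String)) (i : Int) :
    (L.foldl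
      (fun (st : List (List String) × Int) ngrams =>
        if decide (d ≤ st.2) = true then st
        else if decide ((ngrams.length : Int) < n) = true then st
        else (((PySem.List.pyGet? ngrams (n - 1)).getD []).foldl
                (fun g gram => g ++ [gram ++ [node_type]]) st.1, st.2 + 1))
      (acc, i)).1
    = acc ++ ((L.filter (fun ng => decide (n ≤ (ng.length : Int)))).take (d - i).toNat).flatMap
        (fun ngrams => ((PySem.List.pyGet? ngrams (n - 1)).getD []).map (fun gram => gram ++ [node_type])) := by
  induction L generalizing acc i with
  | nil => simp
  | cons x L ih =>
    simp only [List.foldl_cons]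
    by_cases hstop : d ≤ i
    · rw [if_pos (decide_eq_true hstop)]
      rw [ih]
      have h0 : (d - i).toNat = 0 := by omega
      simp [h0]
    · rw [if_neg (by simpa using hstop)]
      by_cases hq : n ≤ (x.length : Int)
      · rw [if_neg (by simp [not_lt.mpr hq])]
        rw [ih, PySem.List.foldl_append_singleton_eq_map]
        have hsucc : (d - i).toNat = (d - (i + 1)).toNat + 1 := by omega
        simp [hq, hsucc]
      · rw [if_pos (decide_eq_true (lt_of_not_ge hq))]
        rw [ih]
        simp [not_le.mpr (lt_of_not_ge hq)]

-- B's window fold without a limit collects the qualifying entries in order.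
theorem pv_slide_none {α : Type} (q : α → Bool) (L w : List α) :
    L.foldl (fun w x => if q x = true then w ++ [x] else w) w = w ++ L.filter q := by
  induction L generalizing w with
  | nil => simp
  | cons x L ih =>
    simp only [List.foldl_cons]
    by_cases hq : q x = true
    · rw [if_pos hq, ih]; simp [hq]
    · rw [if_neg hq, ih]
      simp [hq]

-- B's bounded window fold keeps exactly the last l (qualifying) entries.
theorem pv_slide_some {α : Type} (q : α → Bool) (l : Int) (hl : 0 ≤ l)
    (L w : List α) (hw : w.length ≤ l.toNat) :
    L.foldl (fun w x => if q x = true then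
        (if decide (l < ((w ++ [x]).length : Int)) = true then (w ++ [x]).drop 1 else w ++ [x])
      else w) w
    = ((w ++ L.filter q).reverse.take l.toNat).reverse := by
  induction L generalizing w with
  | nil =>
    simp only [List.foldl_nil, List.filter_nil, List.append_nil]
    rw [List.take_of_length_le (by simpa using hw)]
    simp
  | cons x L ih =>
    simp only [List.foldl_cons]
    by_cases hq : q x = true
    · rw [if_pos hq]
      by_cases hfull : l.toNat ≤ w.length
      · have hfe : w.length = l.toNat := le_antisymm hw hfull
        rw [if_pos (decide_eq_true (show l < ((w ++ [x]).length : Int) by simp; omega))]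
        cases w with
        | nil =>
          have hz : l.toNat = 0 := by simpa using hfe.symm
          rw [ih _ (by simp)]
          simp [hq, hz]
        | cons h t =>
          rw [ih _ (by simp at hw ⊢; omega)]
          have hk : l.toNat ≤ (t ++ [x] ++ L.filter q).length := by
            simp at hfe ⊢; omega
          have hlist : (h :: t) ++ (x :: L).filter q = h :: (t ++ [x] ++ L.filter q) := by
            simp [hq]
          rw [hlist, List.reverse_cons, List.take_append_of_le_length (by simpa only [List.length_reverse] using hk)]
          simp
      · rw [if_neg (by simp; omega)]
        rw [ih _ (by simp; omega)]
        simp [hq, List.append_assoc]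
    · rw [if_neg hq, ih _ hw]
      simp [hq]

-- B's emission loop over the reversed window, as a flatMap.
theorem pv_emit (n : Int) (node_type : String)
    (W : List (List (List (List String)))) (acc : List (List String)) :
    W.foldl
      (fun out ngrams =>
        ((PySem.List.pyGet? ngrams (n - 1)).getD []).foldl
          (fun o gram => o ++ [gram ++ [node_type]]) out) acc
    = acc ++ W.flatMap
        (fun ngrams => ((PySem.List.pyGet? ngrams (n - 1)).getD []).map (fun gram => gram ++ [node_type])) := by
  induction W generalizing acc with
  | nil => simp
  | cons x W ih =>
    simp only [List.foldl_cons]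
    rw [PySem.List.foldl_append_singleton_eq_map, ih]
    simp

-- ===== VERDICT (by name: the statement is the Claim_ definition above) =====
theorem ngrams_recurrent_build_spec : Claim_equal_ngrams_recurrent_build := by
  intro n params ngrams_on_path node_type _hd _hp
  unfold Spec_ngrams_recurrent_build ngrams_recurrent_build ngrams_recurrent_build_alt
  cases hmd : ((PySem.Dict.mk params).get? "max_distance").getD none with
  | none =>
    simp only [Option.isSome_none, Bool.false_and, Bool.false_eq_true, if_false,
      Option.map_none]
    rw [pv_loop_none n node_type ngrams_on_path.reverse [] 0]
    rw [pv_slide_none (fun ng => decide (n ≤ (ng.length : Int))) ngrams_on_path []]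
    rw [pv_emit]
    simp [List.filter_reverse]
  | some d =>
    simp only [Option.isSome_some, Option.getD_some, Bool.true_and, Option.map_some]
    refine (pv_loop_some n node_type d ngrams_on_path.reverse [] 0).trans ?_
    rw [pv_slide_some (fun ng => decide (n ≤ (ng.length : Int))) (max d 0) (le_max_right d 0)
          ngrams_on_path [] (by simp)]
    rw [List.reverse_reverse, pv_emit]
    have hk : (max d 0).toNat = (d - 0).toNat := by omega
    simp [List.filter_reverse, hk]
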